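-- pv_equiv track=rewrite | github.com/MatthewTess/CSE15-Discrete-Mathematics | 015/Lab5/example.py | is_injective
-- ===== SOURCE A (Python) =====
-- def is_injective(A, B, f):
--     for element in f:
--         b = element[1]
--         for other in f:
--             if other != element:
--                 bprime = other[1]
--                 if b == bprime:
--                     return False
--     return True
-- ===== SOURCE B (Python) =====
-- def is_injective(A, B, f):
--     # One pass: hash each b-value to the first element seen with that b;
--     # a later element with the same b that differs means f is not injective.
--     seen = {}
--     for element in f:
--         b = element[1]
--         if b in seen:
--             if seen[b] != element:
--                 return False
--         else:
--             seen[b] = element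
--     return True
-- ===== Notes on version B (the rewrite author's own statement) =====
-- stated objective: alternative
-- what changed: Replaced the quadratic all-pairs scan with a single pass keeping a hash map from b-value to the first element seen with it, flagging a collision of value-distinct elements; on random inputs both exit early so no measured speed-up.
import Mathlib
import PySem

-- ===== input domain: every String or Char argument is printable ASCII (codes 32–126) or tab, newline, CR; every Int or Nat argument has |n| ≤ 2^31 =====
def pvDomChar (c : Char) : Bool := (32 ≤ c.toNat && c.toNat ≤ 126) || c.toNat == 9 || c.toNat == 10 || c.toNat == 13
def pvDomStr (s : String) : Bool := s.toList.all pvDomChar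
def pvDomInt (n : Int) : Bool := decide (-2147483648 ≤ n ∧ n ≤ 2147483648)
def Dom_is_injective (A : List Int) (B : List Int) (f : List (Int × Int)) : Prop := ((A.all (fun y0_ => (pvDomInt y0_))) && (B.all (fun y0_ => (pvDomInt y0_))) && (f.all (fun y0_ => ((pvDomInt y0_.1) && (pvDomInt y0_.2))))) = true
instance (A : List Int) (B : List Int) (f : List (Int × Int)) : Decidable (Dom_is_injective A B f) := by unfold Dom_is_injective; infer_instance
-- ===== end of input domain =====

-- B replaces A's all-pairs scan by one pass with a hash map from b-value to
-- the first element carrying it (objective: alternative algorithm).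


-- ===== PORT A =====
-- outer loop over f with early `return False` ↦ List.any; inner loop likewise
def is_injective (A : List Int) (B : List Int) (f : List (Int × Int)) : Bool :=
  !(f.any (fun element =>
      f.any (fun other =>
        if other ≠ element then
          decide (element.2 = other.2)
        else false)))

-- ===== PORT B =====
-- the loop of Source B: recursion over f carrying the dict `seen`
def isInjAltLoop (seen : PySem.Dict Int (Int × Int)) : List (Int × Int) → Bool
  | [] => true
  | element :: rest =>
    match seen.get? element.2 with
    | some stored => if stored ≠ element then false else isInjAltLoop seen rest
    | none => isInjAltLoop (seen.insert element.2 element) rest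

def is_injective_alt (A : List Int) (B : List Int) (f : List (Int × Int)) : Bool :=
  isInjAltLoop PySem.Dict.empty f

-- ===== PRECONDITION & SPEC =====
def Spec_is_injective (A : List Int) (B : List Int) (f : List (Int × Int)) (out : Bool) : Prop := out = is_injective_alt A B f
instance (A : List Int) (B : List Int) (f : List (Int × Int)) (out : Bool) : Decidable (Spec_is_injective A B f out) := by unfold Spec_is_injective; infer_instance

-- ===== CLAIM (what is proved, stated in full; the proofs are below) =====
def Claim_equal_is_injective : Prop := ∀ (A : List Int) (B : List Int) (f : List (Int × Int)), Dom_is_injective A B f → Spec_is_injective A B f (is_injective A B f)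

-- ===== LEMMAS AND PROOFS =====

/-- f is "good" iff no two value-distinct elements share a second component. -/
def GoodInj (f : List (Int × Int)) : Prop :=
  ∀ e ∈ f, ∀ e' ∈ f, e.2 = e'.2 → e = e'

lemma is_injective_iff (A B : List Int) (f : List (Int × Int)) :
    is_injective A B f = true ↔ GoodInj f := by
  simp only [is_injective, GoodInj, Bool.not_eq_true', List.any_eq_false,
    Bool.not_eq_true]
  constructor
  · intro h e he e' he' hsnd
    have h2 := h e he e' he'
    by_contra hne
    rw [if_pos (fun hx : e' = e => hne hx.symm)] at h2
    exact (decide_eq_false_iff_not.mp h2) hsnd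
  · intro h e he e' he'
    split_ifs with hne
    · simp only [decide_eq_false_iff_not]
      intro hsnd
      exact hne (h e' he' e he hsnd.symm)
    · rfl

lemma isInjAltLoop_true (l : List (Int × Int)) :
    ∀ seen : PySem.Dict Int (Int × Int),
      (isInjAltLoop seen l = true ↔
        ((∀ e ∈ l, ∀ t, seen.get? e.2 = some t → t = e) ∧ GoodInj l)) := by
  induction l with
  | nil => intro seen; simp [isInjAltLoop, GoodInj]
  | cons e rest ih =>
    intro seen
    simp only [isInjAltLoop]
    rcases hg : seen.get? e.2 with _ | t <;> dsimp only
    · -- b not in seen: insert and recurse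
      rw [ih]
      constructor
      · rintro ⟨h1, h2⟩
        refine ⟨?_, ?_⟩
        · intro e' he' t ht
          rcases List.mem_cons.mp he' with he'' | he''
          · rw [he'', hg] at ht; cases ht
          · by_cases hk : e'.2 = e.2
            · rw [hk, hg] at ht; cases ht
            · exact h1 e' he'' t (by rw [PySem.Dict.get?_insert, if_neg hk]; exact ht)
        · intro a ha b hb hab
          rcases List.mem_cons.mp ha with ha' | ha' <;>
            rcases List.mem_cons.mp hb with hb' | hb'
          · rw [ha', hb']
          · have hb2 : b.2 = e.2 := by rw [← hab, ha']
            have hh := h1 b hb' e (by rw [PySem.Dict.get?_insert, if_pos hb2])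
            rw [ha']; exact hh
          · have ha2 : a.2 = e.2 := by rw [hab, hb']
            have hh := h1 a ha' e (by rw [PySem.Dict.get?_insert, if_pos ha2])
            rw [hb']; exact hh.symm
          · exact h2 a ha' b hb' hab
      · rintro ⟨h1, h2⟩
        refine ⟨?_, ?_⟩
        · intro e' he' t ht
          rw [PySem.Dict.get?_insert] at ht
          by_cases hk : e'.2 = e.2
          · rw [if_pos hk] at ht
            have het := Option.some.inj ht
            rw [← het]
            exact (h2 e' (List.mem_cons_of_mem _ he') e (List.mem_cons_self ..) hk).symm
          · rw [if_neg hk] at ht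
            exact h1 e' (List.mem_cons_of_mem _ he') t ht
        · intro a ha b hb hab
          exact h2 a (List.mem_cons_of_mem _ ha) b (List.mem_cons_of_mem _ hb) hab
    · -- b already in seen, bound to t
      by_cases hte : t = e
      · rw [if_neg (not_not_intro hte), ih]
        rw [hte] at hg
        constructor
        · rintro ⟨h1, h2⟩
          refine ⟨?_, ?_⟩
          · intro e' he' t' ht'
            rcases List.mem_cons.mp he' with he'' | he''
            · rw [he'', hg] at ht'; exact (Option.some.inj ht').symm.trans he''.symm
            · exact h1 e' he'' t' ht'
          · intro a ha b hb hab
            rcases List.mem_cons.mp ha with ha' | ha' <;>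
              rcases List.mem_cons.mp hb with hb' | hb'
            · rw [ha', hb']
            · have hb2 : b.2 = e.2 := by rw [← hab, ha']
              have hh := h1 b hb' e (by rw [hb2]; exact hg)
              rw [ha']; exact hh
            · have ha2 : a.2 = e.2 := by rw [hab, hb']
              have hh := h1 a ha' e (by rw [ha2]; exact hg)
              rw [hb']; exact hh.symm
            · exact h2 a ha' b hb' hab
        · rintro ⟨h1, h2⟩
          exact ⟨fun e' he' => h1 e' (List.mem_cons_of_mem _ he'),
                 fun a ha b hb => h2 a (List.mem_cons_of_mem _ ha) b (List.mem_cons_of_mem _ hb)⟩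
      · rw [if_pos hte]
        constructor
        · intro h; cases h
        · rintro ⟨h1, _⟩
          exact absurd (h1 e (List.mem_cons_self ..) t hg) hte

lemma is_injective_alt_iff (A B : List Int) (f : List (Int × Int)) :
    is_injective_alt A B f = true ↔ GoodInj f := by
  rw [is_injective_alt, isInjAltLoop_true]
  simp [PySem.Dict.get?_empty]

-- ===== VERDICT (by name: the statement is the Claim_ definition above) =====
theorem is_injective_spec : Claim_equal_is_injective := by
  intro A B f _
  unfold Spec_is_injective
  rw [Bool.eq_iff_iff, is_injective_iff, is_injective_alt_iff]
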